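-- pv_equiv track=rewrite | github.com/kaluginpeter/Algorithms_and_structures_tasks | CodeWars/5kyu/Subsets_Parity_Extended.py | subset_divisibility
-- ===== SOURCE A (Python) =====
-- def factorize(x):
--     factors = {}
--     while x % 2 == 0:
--         factors[2] = factors.get(2, 0) + 1
--         x //= 2
--     f = 3
--     while f * f <= x:
--         while x % f == 0:
--             factors[f] = factors.get(f, 0) + 1
--             x //= f
--         f += 2
--     if x > 1: factors[x] = factors.get(x, 0) + 1
--     return factors
--
-- def vp_factorial(n, p):
--     s = 0
--     while n:
--         n //= p
--         s += n
--     return s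
--
-- def subset_divisibility(n: int, k: int, d: int) -> bool:
--     factors = factorize(d)
--     for p, need in factors.items():
--         have = (
--             vp_factorial(n, p)
--             - vp_factorial(k, p)
--             - vp_factorial(n - k, p)
--         )
--
--         if have < need: return False
--     return True
-- ===== SOURCE B (Python) =====
-- def _carries(a, b, p):
--     # number of carries when adding a and b in base p
--     cnt = 0
--     carry = 0
--     while a > 0 or b > 0:
--         carry = 1 if (a % p) + (b % p) + carry >= p else 0
--         cnt += carry
--         a //= p
--         b //= p
--     return cnt
--
-- def subset_divisibility(n: int, k: int, d: int) -> bool: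
--     # Kummer's theorem: v_p(C(n,k)) = number of carries when adding k and n-k in base p.
--     # Trial-divide d once, checking each prime power against the carry count on the fly.
--     r = n - k
--     x = d
--     p = 2
--     while p * p <= x:
--         e = 0
--         while x % p == 0:
--             e += 1
--             x //= p
--         if e and _carries(k, r, p) < e:
--             return False
--         p += 1
--     if x > 1 and _carries(k, r, x) < 1:
--         return False
--     return True
-- ===== Notes on version B (the rewrite author's own statement) =====
-- stated objective: alternative
-- what changed: B replaces A's build-a-factor-dict + three Legendre-sum p-adic valuations per prime by a single interleaved trial-division pass that checks each prime power of d on the fly against Kummer's carry count (the number of carries when adding k and n-k in base p).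
-- outside the precondition, e.g. on subset_divisibility(2, 1, -4): A returns False, B returns True
import Mathlib
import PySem

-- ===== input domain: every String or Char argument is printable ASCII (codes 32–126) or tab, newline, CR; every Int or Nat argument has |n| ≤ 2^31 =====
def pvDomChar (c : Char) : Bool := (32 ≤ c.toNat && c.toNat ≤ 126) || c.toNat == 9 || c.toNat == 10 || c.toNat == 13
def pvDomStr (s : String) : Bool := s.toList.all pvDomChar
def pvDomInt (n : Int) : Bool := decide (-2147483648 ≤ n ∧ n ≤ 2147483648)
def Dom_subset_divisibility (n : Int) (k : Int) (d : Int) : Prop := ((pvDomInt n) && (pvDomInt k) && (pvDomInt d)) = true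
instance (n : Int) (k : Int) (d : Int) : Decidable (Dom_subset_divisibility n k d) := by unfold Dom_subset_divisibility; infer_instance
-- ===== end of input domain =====

-- B replaces A's factor-dict + per-prime Legendre-sum valuations by one interleaved trial-division
-- pass that checks each prime power of d against Kummer's carry count (carries of k + (n-k) in base p);
-- objective: alternative (same asymptotic cost, different algorithm).

-- ===== PORT A =====
-- Python's `while x % f == 0: factors[f] = factors.get(f, 0) + 1; x //= f` occurs twice
-- (once with the literal 2, once with loop variable f); ported once, parametrised by f.
def facDivLoop : Nat → Int → PySem.Dict Int Int → Int → (PySem.Dict Int Int × Int)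
  | 0, _, fa, x => (fa, x)
  | fuel+1, f, fa, x =>
    if PySem.Int.mod x f == 0 then
      facDivLoop fuel f (fa.insert f (fa.getD f 0 + 1)) (PySem.Int.floordiv x f)
    else (fa, x)

-- `f = 3; while f * f <= x: …inner…; f += 2`
def facOuterLoop : Nat → Int → PySem.Dict Int Int → Int → (PySem.Dict Int Int × Int)
  | 0, _, fa, x => (fa, x)
  | fuel+1, f, fa, x =>
    if f * f ≤ x then
      let r := facDivLoop (x.natAbs + 2) f fa x
      facOuterLoop fuel (f + 2) r.1 r.2
    else (fa, x)

def factorize (x : Int) : PySem.Dict Int Int :=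
  let r2 := facDivLoop (x.natAbs + 2) 2 PySem.Dict.empty x
  let ro := facOuterLoop (r2.2.natAbs + 2) 3 r2.1 r2.2
  if 1 < ro.2 then ro.1.insert ro.2 (ro.1.getD ro.2 0 + 1) else ro.1

-- `s = 0; while n: n //= p; s += n`
def vpfLoop : Nat → Int → Int → Int → Int
  | 0, _, _, s => s
  | fuel+1, p, n, s =>
    if n ≠ 0 then
      let n' := PySem.Int.floordiv n p
      vpfLoop fuel p n' (s + n')
    else s

def vp_factorial (n p : Int) : Int := vpfLoop (n.natAbs + 2) p n 0

-- `for p, need in factors.items(): … if have < need: return False` then `return True`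
def checkLoop (n k : Int) : List (Int × Int) → Bool
  | [] => true
  | pe :: rest =>
    let hv := vp_factorial n pe.1 - vp_factorial k pe.1 - vp_factorial (n - k) pe.1
    if hv < pe.2 then false else checkLoop n k rest

def subset_divisibility (n : Int) (k : Int) (d : Int) : Bool :=
  checkLoop n k (factorize d).items

-- ===== PORT B =====
-- `while a > 0 or b > 0: carry = 1 if a%p + b%p + carry >= p else 0; cnt += carry; a //= p; b //= p`
def carriesLoop : Nat → Int → Int → Int → Int → Int → Int
  | 0, _, _, _, _, cnt => cnt
  | fuel+1, p, a, b, carry, cnt =>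
    if a > 0 || b > 0 then
      let carry' : Int := if p ≤ PySem.Int.mod a p + PySem.Int.mod b p + carry then 1 else 0
      carriesLoop fuel p (PySem.Int.floordiv a p) (PySem.Int.floordiv b p) carry' (cnt + carry')
    else cnt

def carries (a b p : Int) : Int := carriesLoop (a.natAbs + b.natAbs + 2) p a b 0 0

-- `e = 0; while x % p == 0: e += 1; x //= p`   (returns (e, x))
def altInner : Nat → Int → Int → Int → (Int × Int)
  | 0, _, x, e => (e, x)
  | fuel+1, p, x, e =>
    if PySem.Int.mod x p == 0 then altInner fuel p (PySem.Int.floordiv x p) (e + 1) else (e, x)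

-- `p = 2; while p*p <= x: …; p += 1` then the tail test
def altOuter : Nat → Int → Int → Int → Int → Bool
  | 0, _, _, _, _ => true
  | fuel+1, k, r, p, x =>
    if p * p ≤ x then
      let re := altInner (x.natAbs + 2) p x 0
      if re.1 ≠ 0 && carries k r p < re.1 then false
      else altOuter fuel k r (p + 1) re.2
    else if x > 1 && carries k r x < 1 then false else true

def subset_divisibility_alt (n : Int) (k : Int) (d : Int) : Bool :=
  altOuter (d.natAbs + 2) k (n - k) 2 d

-- ===== PRECONDITION & SPEC =====
-- Pre_ admits the well-formed domain 0 ≤ k ≤ n, d ≥ 1, plus every odd negative d (there A's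
-- factor dict is empty and both programs return True); it excludes d = 0 (A loops forever),
-- k < 0 / k > n / n < 0 with d ≠ odd-negative (A loops forever in vp_factorial), and even
-- negative d with 0 ≤ k ≤ n, where A returns an accidental test of only the 2-part of |d|
-- left over from trial-dividing a negative number.
def Pre_subset_divisibility (n : Int) (k : Int) (d : Int) : Prop :=
  (1 ≤ d ∧ 0 ≤ k ∧ k ≤ n) ∨ (d < 0 ∧ d % 2 = 1)
instance (n : Int) (k : Int) (d : Int) : Decidable (Pre_subset_divisibility n k d) := by
  unfold Pre_subset_divisibility; infer_instance

def pvWitness_subset_divisibility : Int × Int × Int := (10, 4, 12)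

def Spec_subset_divisibility (n : Int) (k : Int) (d : Int) (out : Bool) : Prop := out = subset_divisibility_alt n k d
instance (n : Int) (k : Int) (d : Int) (out : Bool) : Decidable (Spec_subset_divisibility n k d out) := by unfold Spec_subset_divisibility; infer_instance

-- ===== CLAIM (what is proved, stated in full; the proofs are below) =====
def Claim_equal_subset_divisibility : Prop := ∀ (n : Int) (k : Int) (d : Int), Dom_subset_divisibility n k d → Pre_subset_divisibility n k d → Spec_subset_divisibility n k d (subset_divisibility n k d)

-- ===== LEMMAS AND PROOFS =====


-- ---------- reference layer (Nat) ----------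

/-- `(e, y)`: the multiplicity of `p` removed from `x` and the cofactor. -/
def removeP (p x : Nat) : Nat × Nat :=
  if h : 2 ≤ p ∧ 0 < x ∧ p ∣ x then
    ((removeP p (x / p)).1 + 1, (removeP p (x / p)).2)
  else (0, x)
termination_by x
decreasing_by all_goals exact Nat.div_lt_self h.2.1 (by omega)

theorem removeP_snd_le (p x : Nat) : (removeP p x).2 ≤ x := by
  fun_induction removeP with
  | case1 x h ih => simpa using le_trans ih (Nat.div_le_self _ _)
  | case2 => simp

theorem removeP_snd_dvd (p x : Nat) : (removeP p x).2 ∣ x := by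
  fun_induction removeP with
  | case1 x h ih => simpa using ih.trans (Nat.div_dvd_of_dvd h.2.2)
  | case2 => simp

theorem removeP_snd_pos (p x : Nat) (hx : 0 < x) : 0 < (removeP p x).2 := by
  fun_induction removeP with
  | case1 x h ih => simpa using ih (Nat.div_pos (Nat.le_of_dvd h.2.1 h.2.2) (by omega))
  | case2 => simpa

theorem removeP_not_dvd (p x : Nat) (hp : 2 ≤ p) (hx : 0 < x) : ¬ p ∣ (removeP p x).2 := by
  fun_induction removeP with
  | case1 x h ih => simpa using ih (Nat.div_pos (Nat.le_of_dvd h.2.1 h.2.2) (by omega))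
  | case2 x h => intro hd; exact h ⟨hp, hx, hd⟩

theorem removeP_of_not_dvd (p x : Nat) (h : ¬ p ∣ x) : removeP p x = (0, x) := by
  rw [removeP]; simp [h]

theorem removeP_of_dvd (p x : Nat) (hp : 2 ≤ p) (hx : 0 < x) (h : p ∣ x) :
    removeP p x = ((removeP p (x / p)).1 + 1, (removeP p (x / p)).2) := by
  rw [removeP]; simp [hp, hx, h]

/-- Legendre loop: `Σ_{i≥1} ⌊n/p^i⌋` as A's `vp_factorial` computes it. -/
def legN (p n : Nat) : Nat :=
  if h : n / p < n then n / p + legN p (n / p) else 0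
termination_by n
decreasing_by exact h

theorem legN_zero (p : Nat) : legN p 0 = 0 := by rw [legN]; simp

theorem legN_unfold (p n : Nat) (hp : 2 ≤ p) : legN p n = n / p + legN p (n / p) := by
  rcases Nat.eq_zero_or_pos n with h0 | h0
  · subst h0; simp [legN_zero]
  · rw [legN, dif_pos (Nat.div_lt_self h0 (by omega))]

theorem legN_one (p : Nat) (hp : 2 ≤ p) : legN p 1 = 0 := by
  rw [legN_unfold p 1 hp, Nat.div_eq_of_lt (by omega), legN_zero]

/-- Carry-count loop: number of carries adding `a` and `b` (incoming carry `c`) in base `p`. -/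
def carN (p a b c : Nat) : Nat :=
  if h : a / p + b / p < a + b then
    (if p ≤ a % p + b % p + c then 1 else 0) +
      carN p (a / p) (b / p) (if p ≤ a % p + b % p + c then 1 else 0)
  else 0
termination_by a + b
decreasing_by all_goals exact h

theorem carN_zero (p c : Nat) : carN p 0 0 c = 0 := by rw [carN]; simp

theorem carN_unfold (p a b c : Nat) (hp : 2 ≤ p) (hab : 0 < a + b) :
    carN p a b c =
      (if p ≤ a % p + b % p + c then 1 else 0) +
        carN p (a / p) (b / p) (if p ≤ a % p + b % p + c then 1 else 0) := by
  have h : a / p + b / p < a + b := by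
    rcases Nat.lt_or_ge 0 a with ha | ha
    · have := Nat.div_lt_self ha (show 1 < p by omega)
      have := Nat.div_le_self b p
      omega
    · have hb : 0 < b := by omega
      have := Nat.div_lt_self hb (show 1 < p by omega)
      have := Nat.div_le_self a p
      omega
  rw [carN, dif_pos h]

/-- KEY IDENTITY (Kummer ↔ Legendre): carries + legendre a + legendre b = legendre (a+b+c). -/
theorem carN_add_legN (p : Nat) (hp : 2 ≤ p) :
    ∀ m a b c, a + b ≤ m → c ≤ 1 →
      carN p a b c + legN p a + legN p b = legN p (a + b + c) := by
  intro m
  induction m with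
  | zero =>
    intro a b c hab hc
    have ha : a = 0 := by omega
    have hb : b = 0 := by omega
    subst ha; subst hb
    interval_cases c <;> simp [carN_zero, legN_zero, legN_one p hp]
  | succ m ih =>
    intro a b c hab hc
    rcases Nat.eq_zero_or_pos (a + b) with h0 | h0
    · have ha : a = 0 := by omega
      have hb : b = 0 := by omega
      subst ha; subst hb
      interval_cases c <;> simp [carN_zero, legN_zero, legN_one p hp]
    · rw [carN_unfold p a b c hp h0]
      set c' : Nat := if p ≤ a % p + b % p + c then 1 else 0 with hc'
      have hc'le : c' ≤ 1 := by rw [hc']; split <;> omega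
      have h1 : a + b + c = p * (a / p + b / p) + (a % p + b % p + c) := by
        rw [Nat.mul_add]
        have ha := Nat.div_add_mod a p
        have hb := Nat.div_add_mod b p
        omega
      have hma : a % p < p := Nat.mod_lt _ (by omega)
      have hmb : b % p < p := Nat.mod_lt _ (by omega)
      have h2 : (a % p + b % p + c) / p = c' := by
        rw [hc']
        split
        · next hge =>
          have heq : a % p + b % p + c = p + (a % p + b % p + c - p) := by omega
          rw [heq, Nat.add_div_left _ (by omega), Nat.div_eq_of_lt (by omega)]
        · next hge => rw [Nat.div_eq_of_lt (by omega)]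
      have hdiv : (a + b + c) / p = a / p + b / p + c' := by
        rw [h1, Nat.mul_add_div (by omega)]
        omega
      have hrec : a / p + b / p ≤ m := by
        have ha' : a / p ≤ a := Nat.div_le_self a p
        have hb' : b / p ≤ b := Nat.div_le_self b p
        rcases Nat.lt_or_ge 0 a with hA | hA
        · have := Nat.div_lt_self hA (show 1 < p by omega); omega
        · have hB : 0 < b := by omega
          have := Nat.div_lt_self hB (show 1 < p by omega); omega
      have IH := ih (a / p) (b / p) c' hrec hc'le
      rw [legN_unfold p a hp, legN_unfold p b hp, legN_unfold p (a + b + c) hp, hdiv]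
      omega

/-- Loop pairs (factor, multiplicity) from trial division starting at `f` step 1, and final cofactor. -/
def facFromP (f x : Nat) : List (Nat × Nat) × Nat :=
  if h : 2 ≤ f ∧ f * f ≤ x then
    (if (removeP f x).1 = 0 then (facFromP (f + 1) (removeP f x).2).1
     else (f, (removeP f x).1) :: (facFromP (f + 1) (removeP f x).2).1,
     (facFromP (f + 1) (removeP f x).2).2)
  else ([], x)
termination_by (x + 2) - f
decreasing_by all_goals
  have h1 : (removeP f x).2 ≤ x := removeP_snd_le f x
  have h2 : f ≤ x := le_trans (Nat.le_mul_of_pos_left f (by omega)) h.2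
  omega

/-- Same with step 2 (A's odd loop). -/
def facOddP (f x : Nat) : List (Nat × Nat) × Nat :=
  if h : 2 ≤ f ∧ f * f ≤ x then
    (if (removeP f x).1 = 0 then (facOddP (f + 2) (removeP f x).2).1
     else (f, (removeP f x).1) :: (facOddP (f + 2) (removeP f x).2).1,
     (facOddP (f + 2) (removeP f x).2).2)
  else ([], x)
termination_by (x + 2) - f
decreasing_by all_goals
  have h1 : (removeP f x).2 ≤ x := removeP_snd_le f x
  have h2 : f ≤ x := le_trans (Nat.le_mul_of_pos_left f (by omega)) h.2
  omega


-- ---------- generic dict fact used by the port bridges ----------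

theorem dict_insert_insert {κ ν : Type} [BEq κ] [LawfulBEq κ] (d : PySem.Dict κ ν) (k : κ) (a b : ν) :
    (d.insert k a).insert k b = d.insert k b := by
  apply PySem.Dict.ext
  by_cases h : d.contains k = true
  · rw [PySem.Dict.items_insert_of_contains _ _ h,
        PySem.Dict.items_insert_of_contains _ _ (by simp [PySem.Dict.contains_insert, h]),
        PySem.Dict.items_insert_of_contains _ _ h, List.map_map]
    apply List.map_congr_left
    intro p _
    by_cases hp : (p.1 == k) = true <;> simp [hp]
  · have h1 : (d.insert k a).contains k = true := by
      simp [PySem.Dict.contains_insert]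
    rw [PySem.Dict.items_insert_of_contains (d.insert k a) b h1,
        PySem.Dict.items_insert_of_not_contains d a (by simpa using h),
        PySem.Dict.items_insert_of_not_contains d b (by simpa using h), List.map_append]
    congr 1
    · have hmap : List.map (fun p => if (p.1 == k) = true then (k, b) else p) d.items
          = List.map id d.items := by
        apply List.map_congr_left
        intro p hp
        have hne : ¬ (p.1 == k) = true := by
          intro hc
          apply h
          rw [PySem.Dict.contains_iff_mem_keys]
          have := List.mem_map_of_mem (f := Prod.fst) hp
          simpa [PySem.Dict.keys, (by simpa using hc : p.1 = k)] using this
        simp [hne]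
      simpa using hmap
    · simp

theorem guard_mod_cast (x f : Nat) : (PySem.Int.mod ↑x ↑f == 0) = decide (x % f = 0) := by
  rw [PySem.Int.mod_natCast]
  by_cases h : x % f = 0 <;> simp [h] <;> omega

-- ---------- port A's division loop = removeP ----------

theorem facDivLoop_eq (f : Nat) (hf : 2 ≤ f) :
    ∀ (fuel x : Nat) (fa : PySem.Dict Int Int), 0 < x → x ≤ fuel →
    facDivLoop fuel (↑f) fa (↑x) =
      ((if (removeP f x).1 = 0 then fa
        else fa.insert ↑f (fa.getD ↑f 0 + ↑(removeP f x).1)), ↑(removeP f x).2) := by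
  intro fuel
  induction fuel with
  | zero => intro x fa hx hle; omega
  | succ fuel ih =>
    intro x fa hx hle
    simp only [facDivLoop, guard_mod_cast]
    by_cases hdvd : f ∣ x
    · have hmod : x % f = 0 := Nat.dvd_iff_mod_eq_zero.mp hdvd
      rw [if_pos (by simp [hmod]), PySem.Int.floordiv_natCast]
      have hx' : 0 < x / f := Nat.div_pos (Nat.le_of_dvd hx hdvd) (by omega)
      have hlt : x / f < x := Nat.div_lt_self hx (by omega)
      rw [ih (x / f) _ hx' (by omega), removeP_of_dvd f x hf hx hdvd]
      rcases Nat.eq_zero_or_pos (removeP f (x / f)).1 with he | he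
      · simp [he]
      · rw [if_neg (by omega), if_neg (by omega)]
        rw [PySem.Dict.getD_insert_self, dict_insert_insert]
        congr 2
        push_cast
        ring
    · have hmod : ¬ x % f = 0 := by
        intro hc; exact hdvd (Nat.dvd_iff_mod_eq_zero.mpr hc)
      rw [if_neg (by simp [hmod]), removeP_of_not_dvd f x hdvd]
      simp

-- ---------- port A's vp_factorial = legN ----------

theorem vpfLoop_eq (q : Nat) (hq : 2 ≤ q) :
    ∀ (fuel m : Nat) (s : Int), m < fuel →
    vpfLoop fuel (↑q) (↑m) s = s + ↑(legN q m) := by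
  intro fuel
  induction fuel with
  | zero => intro m s h; omega
  | succ fuel ih =>
    intro m s h
    rcases Nat.eq_zero_or_pos m with h0 | h0
    · subst h0; simp [vpfLoop, legN_zero]
    · have hne : ¬((↑m : Int) = 0) := by exact_mod_cast (by omega : ¬ (m = 0))
      simp only [vpfLoop]
      rw [if_pos hne, PySem.Int.floordiv_natCast, ih (m / q) _ (by
        have := Nat.div_lt_self h0 (show 1 < q by omega); omega)]
      rw [legN_unfold q m hq]
      push_cast
      ring

theorem vp_factorial_eq (m q : Nat) (hq : 2 ≤ q) :
    vp_factorial (↑m) (↑q) = ↑(legN q m) := by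
  unfold vp_factorial
  rw [show ((↑m : Int)).natAbs = m from Int.natAbs_natCast m,
      vpfLoop_eq q hq (m + 2) m 0 (by omega)]
  simp

-- ---------- port B's carries = carN ----------

theorem carriesLoop_eq (p : Nat) (hp : 2 ≤ p) :
    ∀ (fuel a b c : Nat) (cnt : Int), c ≤ 1 → a + b < fuel →
    carriesLoop fuel (↑p) (↑a) (↑b) (↑c) cnt = cnt + ↑(carN p a b c) := by
  intro fuel
  induction fuel with
  | zero => intro a b c cnt hc h; omega
  | succ fuel ih =>
    intro a b c cnt hc h
    rcases Nat.eq_zero_or_pos (a + b) with h0 | h0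
    · have ha : a = 0 := by omega
      have hb : b = 0 := by omega
      subst ha; subst hb
      simp [carriesLoop, carN_zero]
    · have hguard : (((↑a : Int) > 0 || ((↑b : Int) > 0)) : Bool) = true := by
        rcases Nat.lt_or_ge 0 a with hA | hA
        · simp; left; exact_mod_cast hA
        · simp; right; omega
      simp only [carriesLoop, hguard, if_true]
      have hcond : ((↑p : Int) ≤ PySem.Int.mod ↑a ↑p + PySem.Int.mod ↑b ↑p + ↑c) ↔
          (p ≤ a % p + b % p + c) := by
        rw [PySem.Int.mod_natCast, PySem.Int.mod_natCast]
        exact_mod_cast Iff.rfl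
      set c' : Nat := if p ≤ a % p + b % p + c then 1 else 0 with hc'
      have hcast : (if (↑p : Int) ≤ PySem.Int.mod ↑a ↑p + PySem.Int.mod ↑b ↑p + ↑c then (1:Int) else 0) = ↑c' := by
        rw [hc']
        by_cases hcc : p ≤ a % p + b % p + c
        · rw [if_pos (hcond.mpr hcc), if_pos hcc]; simp
        · rw [if_neg (fun hc2 => hcc (hcond.mp hc2)), if_neg hcc]; simp
      rw [hcast, PySem.Int.floordiv_natCast, PySem.Int.floordiv_natCast]
      have hc'le : c' ≤ 1 := by rw [hc']; split <;> omega
      have hfu : a / p + b / p < fuel := by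
        rcases Nat.lt_or_ge 0 a with hA | hA
        · have := Nat.div_lt_self hA (show 1 < p by omega)
          have := Nat.div_le_self b p
          omega
        · have hB : 0 < b := by omega
          have := Nat.div_lt_self hB (show 1 < p by omega)
          have := Nat.div_le_self a p
          omega
      rw [ih (a / p) (b / p) c' _ hc'le hfu, carN_unfold p a b c hp h0]
      rw [hc'] at *
      push_cast
      ring
    
theorem carries_eq (a b p : Nat) (hp : 2 ≤ p) :
    carries (↑a) (↑b) (↑p) = ↑(carN p a b 0) := by
  unfold carries
  rw [show ((↑a : Int)).natAbs = a from Int.natAbs_natCast a,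
      show ((↑b : Int)).natAbs = b from Int.natAbs_natCast b]
  have h := carriesLoop_eq p hp (a + b + 2) a b 0 0 (by omega) (by omega)
  simpa using h

-- ---------- port B's inner division loop = removeP ----------

theorem altInner_eq (p : Nat) (hp : 2 ≤ p) :
    ∀ (fuel x : Nat) (e : Int), 0 < x → x ≤ fuel →
    altInner fuel (↑p) (↑x) e = (e + ↑(removeP p x).1, ↑(removeP p x).2) := by
  intro fuel
  induction fuel with
  | zero => intro x e hx hle; omega
  | succ fuel ih =>
    intro x e hx hle
    simp only [altInner, guard_mod_cast]
    by_cases hdvd : p ∣ x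
    · have hmod : x % p = 0 := Nat.dvd_iff_mod_eq_zero.mp hdvd
      rw [if_pos (by simp [hmod]), PySem.Int.floordiv_natCast]
      have hx' : 0 < x / p := Nat.div_pos (Nat.le_of_dvd hx hdvd) (by omega)
      have hlt : x / p < x := Nat.div_lt_self hx (by omega)
      rw [ih (x / p) _ hx' (by omega), removeP_of_dvd p x hp hx hdvd]
      rw [Prod.mk.injEq]
      exact ⟨by push_cast; ring, rfl⟩
    · have hmod : ¬ x % p = 0 := by
        intro hc; exact hdvd (Nat.dvd_iff_mod_eq_zero.mpr hc)
      rw [if_neg (by simp [hmod]), removeP_of_not_dvd p x hdvd]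
      simp



-- ---------- structural properties of the trial-division references ----------

theorem facOddP_snd_dvd (f x : Nat) : (facOddP f x).2 ∣ x := by
  fun_induction facOddP with
  | case1 f x h ih => simpa using ih.trans (removeP_snd_dvd f x)
  | case2 f x h => simp

theorem facOddP_pairs (f x : Nat) :
    0 < x → ∀ pe ∈ (facOddP f x).1, 2 ≤ pe.1 ∧ ¬ pe.1 ∣ (facOddP f x).2 := by
  fun_induction facOddP with
  | case1 f x h ih =>
    intro hx pe hpe
    have hy : 0 < (removeP f x).2 := removeP_snd_pos f x hx
    have hnd : ¬ f ∣ (removeP f x).2 := removeP_not_dvd f x h.1 hx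
    have hsnd : (facOddP (f + 2) (removeP f x).2).2 ∣ (removeP f x).2 :=
      facOddP_snd_dvd (f + 2) (removeP f x).2
    simp only at hpe ⊢
    rcases Nat.eq_zero_or_pos (removeP f x).1 with he | he
    · rw [if_pos he] at hpe
      exact ih hy pe hpe
    · rw [if_neg (by omega)] at hpe
      rcases List.mem_cons.mp hpe with rfl | hmem
      · exact ⟨h.1, fun hc => hnd (hc.trans hsnd)⟩
      · exact ih hy pe hmem
  | case2 f x h => intro hx pe hpe; simp at hpe

theorem facFromP_even_skip (f x : Nat) (hf : 2 ≤ f) (he : 2 ∣ f) (hx : ¬ 2 ∣ x) :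
    facFromP f x = facFromP (f + 1) x := by
  by_cases hg : f * f ≤ x
  · have hnd : ¬ f ∣ x := fun hd => hx (dvd_trans he hd)
    rw [facFromP, dif_pos ⟨hf, hg⟩, removeP_of_not_dvd f x hnd]
    simp
  · have hmono : f * f ≤ (f + 1) * (f + 1) := Nat.mul_le_mul (Nat.le_succ f) (Nat.le_succ f)
    rw [facFromP, dif_neg (fun hc => hg hc.2), facFromP, dif_neg (fun hc => hg (by omega))]

theorem facOddP_eq_facFromP (f x : Nat) :
    ¬ 2 ∣ x → ¬ 2 ∣ f → 3 ≤ f → facOddP f x = facFromP f x := by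
  fun_induction facOddP with
  | case1 f x h ih =>
    intro hx hf h3
    have hydvd := removeP_snd_dvd f x
    have hyodd : ¬ 2 ∣ (removeP f x).2 := fun hd => hx (hd.trans hydvd)
    have hstep : facFromP (f + 1) (removeP f x).2 = facFromP (f + 2) (removeP f x).2 := by
      have := facFromP_even_skip (f + 1) (removeP f x).2 (by omega) (by omega) hyodd
      simpa using this
    rw [facFromP, dif_pos h, hstep, ih hyodd (by omega) (by omega)]
  | case2 f x h => intro hx hf h3; rw [facFromP, dif_neg h]

-- ---------- the common check both programs compute ----------

/-- pairs-then-tail check: every found prime power must divide, measured by the carry count. -/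
def refCheck (kN rN : Nat) (pr : List (Nat × Nat) × Nat) : Bool :=
  (pr.1.all fun pe => decide (pe.2 ≤ carN pe.1 kN rN 0)) &&
  !(decide (1 < pr.2) && decide (carN pr.2 kN rN 0 = 0))

-- ---------- port B = refCheck over facFromP ----------

theorem altOuter_eq (kN rN : Nat) :
    ∀ (fuel p x : Nat), 2 ≤ p → 0 < x → x + 2 ≤ fuel + p → 1 ≤ fuel →
    altOuter fuel (↑kN) (↑rN) (↑p) (↑x) = refCheck kN rN (facFromP p x) := by
  intro fuel
  induction fuel with
  | zero => intro p x _ _ _ h1; omega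
  | succ fuel ih =>
    intro p x hp hx hfu _
    simp only [altOuter, Int.natAbs_natCast]
    by_cases hg : p * p ≤ x
    · rw [if_pos (by exact_mod_cast hg)]
      simp only [altInner_eq p hp (x + 2) x 0 hx (by omega), carries_eq kN rN p hp]
      have hppos : p ≤ x := le_trans (Nat.le_mul_of_pos_left p (by omega)) hg
      have hy : 0 < (removeP p x).2 := removeP_snd_pos p x hx
      have hyle : (removeP p x).2 ≤ x := removeP_snd_le p x
      have hrec : altOuter fuel (↑kN) (↑rN) ((↑p : Int) + 1) (↑(removeP p x).2)
          = refCheck kN rN (facFromP (p + 1) (removeP p x).2) := by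
        rw [show ((↑p : Int) + 1) = ((↑(p + 1) : Int)) from by push_cast; ring]
        exact ih (p + 1) (removeP p x).2 (by omega) hy (by omega) (by omega)
      rw [facFromP, dif_pos ⟨by omega, hg⟩]
      rcases Nat.eq_zero_or_pos (removeP p x).1 with he | he
      · rw [if_neg (by simp [he])]
        simp [hrec, refCheck, he]
      · have hne : (removeP p x).1 ≠ 0 := by omega
        by_cases hcar : carN p kN rN 0 < (removeP p x).1
        · rw [if_pos (by simp [hne, Nat.cast_lt, hcar])]
          simp [refCheck, hne, List.all_cons]
          exact fun h1 _ => absurd h1 (by omega)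
        · rw [if_neg (by simp [Nat.cast_lt]; intro h1; omega)]
          rw [hrec]
          simp [refCheck, hne, List.all_cons, (by omega : (removeP p x).1 ≤ carN p kN rN 0)]
    · rw [if_neg (by exact_mod_cast hg)]
      rw [facFromP, dif_neg (fun hc => hg hc.2)]
      by_cases hx1 : 1 < x
      · rw [carries_eq kN rN x hx1]
        by_cases hc0 : carN x kN rN 0 = 0
        · rw [if_pos (by simp [hc0]; exact_mod_cast hx1)]
          simp [refCheck, hx1, hc0]
        · rw [if_neg (by simp [Nat.cast_lt]; intro h1; omega)]
          simp [refCheck, hx1, hc0]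
      · have hxx : x = 1 := by omega
        subst hxx
        rw [if_neg (by simp)]
        simp [refCheck]


-- ---------- port A's outer loop = facOddP, appended to the dict ----------

theorem facOuterLoop_eq :
    ∀ (fuel f x : Nat) (fa : PySem.Dict Int Int), 3 ≤ f → 0 < x → x + 2 ≤ 2 * fuel + f →
    (∀ key ∈ fa.keys, ∃ kn : Nat, key = (↑kn : Int) ∧ kn < f) →
    facOuterLoop fuel (↑f) fa (↑x) =
      (PySem.Dict.mk (fa.items ++ (facOddP f x).1.map (fun pe => ((↑pe.1 : Int), (↑pe.2 : Int)))),
       ↑(facOddP f x).2) := by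
  intro fuel
  induction fuel with
  | zero =>
    intro f x fa h3 hx hfu hkeys
    have hng : ¬ (f * f ≤ x) := by
      intro hc
      have : f ≤ x := le_trans (Nat.le_mul_of_pos_left f (by omega)) hc
      omega
    rw [facOddP, dif_neg (fun hc => hng hc.2)]
    simp [facOuterLoop]
  | succ fuel ih =>
    intro f x fa h3 hx hfu hkeys
    simp only [facOuterLoop, Int.natAbs_natCast]
    by_cases hg : f * f ≤ x
    · rw [if_pos (by exact_mod_cast hg)]
      have h2f : 2 ≤ f := by omega
      rw [facDivLoop_eq f h2f (x + 2) x fa hx (by omega)]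
      have hypos : 0 < (removeP f x).2 := removeP_snd_pos f x hx
      have hyle : (removeP f x).2 ≤ x := removeP_snd_le f x
      have h3f : 3 * f ≤ x := le_trans (Nat.mul_le_mul_right f h3) hg
      have hnmem : ¬ ((↑f : Int) ∈ fa.keys) := by
        intro hmem
        obtain ⟨kn, hkeq, hklt⟩ := hkeys _ hmem
        have : f = kn := by exact_mod_cast hkeq
        omega
      have hfc : fa.contains (↑f : Int) = false :=
        Bool.eq_false_iff.mpr (fun hb => hnmem ((PySem.Dict.contains_iff_mem_keys fa _).mp hb))
      have hfa'items :
          (if (removeP f x).1 = 0 then fa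
            else fa.insert ↑f (fa.getD ↑f 0 + ↑(removeP f x).1)).items =
          fa.items ++ (if (removeP f x).1 = 0 then []
            else [((↑f : Int), (↑(removeP f x).1 : Int))]) := by
        rcases Nat.eq_zero_or_pos (removeP f x).1 with he | he
        · simp [he]
        · rw [if_neg (by omega), if_neg (by omega),
             PySem.Dict.items_insert_of_not_contains fa _ hfc,
             PySem.Dict.getD_of_not_contains fa _ hfc]
          norm_num
      have hfa'keys : ∀ key ∈ (if (removeP f x).1 = 0 then fa
            else fa.insert ↑f (fa.getD ↑f 0 + ↑(removeP f x).1)).keys,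
          ∃ kn : Nat, key = (↑kn : Int) ∧ kn < f + 2 := by
        intro key hkey
        have hkeysdef : ∀ (d : PySem.Dict Int Int), d.keys = d.items.map (·.1) := fun _ => rfl
        rw [hkeysdef, hfa'items, List.map_append, List.mem_append] at hkey
        rcases hkey with hold | hnew
        · obtain ⟨kn, hkeq, hklt⟩ := hkeys _ (by rw [hkeysdef]; exact hold)
          exact ⟨kn, hkeq, by omega⟩
        · rcases Nat.eq_zero_or_pos (removeP f x).1 with he | he
          · simp [he] at hnew
          · rw [if_neg (by omega)] at hnew
            simp at hnew
            exact ⟨f, by simp [hnew], by omega⟩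
      have hrec := ih (f + 2) (removeP f x).2
        (if (removeP f x).1 = 0 then fa
          else fa.insert ↑f (fa.getD ↑f 0 + ↑(removeP f x).1))
        (by omega) hypos (by omega) hfa'keys
      rw [facOddP, dif_pos ⟨h2f, hg⟩]
      rw [show ((↑f : Int) + 2) = ((↑(f + 2) : Int)) from by push_cast; ring, hrec]
      rw [hfa'items]
      rcases Nat.eq_zero_or_pos (removeP f x).1 with he | he
      · simp [he]
      · rw [if_neg (by omega), if_neg (by omega)]
        simp [List.append_assoc]
    · rw [if_neg (by exact_mod_cast hg)]
      rw [facOddP, dif_neg (fun hc => hg hc.2)]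
      simp

-- ---------- port A's check loop over cast pairs = the Nat-level all ----------

theorem checkLoop_eq (nN kN rN : Nat) (hsum : nN = kN + rN) :
    ∀ L : List (Nat × Nat), (∀ pe ∈ L, 2 ≤ pe.1) →
    checkLoop (↑nN) (↑kN) (L.map fun pe => ((↑pe.1 : Int), (↑pe.2 : Int))) =
      L.all fun pe => decide (pe.2 ≤ carN pe.1 kN rN 0) := by
  intro L
  induction L with
  | nil => intro _; rfl
  | cons pe rest ih =>
    intro hall
    obtain ⟨q, e⟩ := pe
    have hq : 2 ≤ q := hall (q, e) (by simp)
    simp only [List.map_cons, checkLoop]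
    rw [show ((↑nN : Int) - ↑kN) = (↑rN : Int) from by subst hsum; push_cast; ring]
    rw [vp_factorial_eq nN q hq, vp_factorial_eq kN q hq, vp_factorial_eq rN q hq]
    have hkey := carN_add_legN q hq (kN + rN) kN rN 0 (le_refl _) (by omega)
    rw [Nat.add_zero] at hkey
    have hv : (↑(legN q nN) : Int) - ↑(legN q kN) - ↑(legN q rN) = ↑(carN q kN rN 0) := by
      subst hsum; push_cast; omega
    rw [hv]
    by_cases hlt : carN q kN rN 0 < e
    · rw [if_pos (by exact_mod_cast hlt)]
      simp [List.all_cons]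
      exact fun h1 => absurd h1 (by omega)
    · rw [if_neg (by exact_mod_cast hlt), ih (fun pe hpe => hall pe (List.mem_cons_of_mem _ hpe))]
      simp [List.all_cons, (by omega : e ≤ carN q kN rN 0)]

-- ---------- A's factor dict, in full ----------

/-- the (factor, multiplicity) pairs A's dict holds, in insertion order. -/
def aPairs (dN : Nat) : List (Nat × Nat) :=
  (if (removeP 2 dN).1 = 0 then [] else [(2, (removeP 2 dN).1)]) ++
  (facOddP 3 (removeP 2 dN).2).1 ++
  (if 1 < (facOddP 3 (removeP 2 dN).2).2 then [((facOddP 3 (removeP 2 dN).2).2, 1)] else [])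

theorem mk_insert_fresh (L : List (Int × Int)) (key v : Int)
    (h : ∀ p ∈ L, p.1 ≠ key) :
    ((PySem.Dict.mk L).insert key ((PySem.Dict.mk L).getD key 0 + v)).items = L ++ [(key, 0 + v)] := by
  have hnm : ¬ key ∈ (PySem.Dict.mk L).keys := by
    intro hmem
    have : (PySem.Dict.mk L).keys = L.map (·.1) := rfl
    rw [this] at hmem
    obtain ⟨p, hp, hpe⟩ := List.mem_map.mp hmem
    exact h p hp hpe
  have hc : (PySem.Dict.mk L).contains key = false :=
    Bool.eq_false_iff.mpr (fun hb => hnm ((PySem.Dict.contains_iff_mem_keys _ _).mp hb))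
  rw [PySem.Dict.items_insert_of_not_contains _ _ hc,
      PySem.Dict.getD_of_not_contains _ _ hc]

theorem factorize_items (dN : Nat) (hd : 1 ≤ dN) :
    (factorize ↑dN).items = (aPairs dN).map (fun pe => ((↑pe.1 : Int), (↑pe.2 : Int))) := by
  have h2c : (2 : Int) = ((↑(2 : Nat) : Int)) := rfl
  have h3c : (3 : Int) = ((↑(3 : Nat) : Int)) := rfl
  simp only [factorize, Int.natAbs_natCast, h2c, h3c]
  rw [facDivLoop_eq 2 (le_refl 2) (dN + 2) dN PySem.Dict.empty (by omega) (by omega)]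
  dsimp only
  have hy1pos : 0 < (removeP 2 dN).2 := removeP_snd_pos 2 dN (by omega)
  have hy1odd : ¬ 2 ∣ (removeP 2 dN).2 := removeP_not_dvd 2 dN (le_refl 2) (by omega)
  have hD2items :
      (if (removeP 2 dN).1 = 0 then PySem.Dict.empty
        else PySem.Dict.empty.insert ((↑(2:Nat) : Int)) ((PySem.Dict.empty.getD ((↑(2:Nat) : Int)) 0 : Int) + (↑(removeP 2 dN).1 : Int))).items =
      ((if (removeP 2 dN).1 = 0 then ([] : List (Nat × Nat)) else [(2, (removeP 2 dN).1)]).map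
        (fun pe => ((↑pe.1 : Int), (↑pe.2 : Int)))) := by
    rcases Nat.eq_zero_or_pos (removeP 2 dN).1 with he | he
    · simp [he]; rfl
    · rw [if_neg (by omega), if_neg (by omega),
         PySem.Dict.items_insert_of_not_contains PySem.Dict.empty _ (by simp),
         PySem.Dict.getD_of_not_contains PySem.Dict.empty _ (by simp)]
      simp only [zero_add]
      rfl
  have hD2keys : ∀ key ∈ (if (removeP 2 dN).1 = 0 then PySem.Dict.empty
        else PySem.Dict.empty.insert ((↑(2:Nat) : Int)) ((PySem.Dict.empty.getD ((↑(2:Nat) : Int)) 0 : Int) + (↑(removeP 2 dN).1 : Int))).keys,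
      ∃ kn : Nat, key = (↑kn : Int) ∧ kn < 3 := by
    intro key hkey
    rcases Nat.eq_zero_or_pos (removeP 2 dN).1 with he | he
    · rw [if_pos he] at hkey
      simp [PySem.Dict.empty] at hkey
    · rw [if_neg (by omega),
          PySem.Dict.keys_insert_of_not_contains PySem.Dict.empty _ (by simp)] at hkey
      simp [PySem.Dict.empty] at hkey
      exact ⟨2, by simp [hkey], by omega⟩
  rw [Int.natAbs_natCast]
  rw [facOuterLoop_eq ((removeP 2 dN).2 + 2) 3 (removeP 2 dN).2 _ (le_refl 3) hy1pos (by omega) hD2keys]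
  dsimp only
  have hy2dvd : (facOddP 3 (removeP 2 dN).2).2 ∣ (removeP 2 dN).2 :=
    facOddP_snd_dvd 3 (removeP 2 dN).2
  by_cases h12 : 1 < (facOddP 3 (removeP 2 dN).2).2
  · rw [if_pos (by exact_mod_cast h12)]
    rw [mk_insert_fresh]
    · rw [hD2items]
      unfold aPairs
      rw [if_pos h12]
      norm_num [List.append_assoc]
    · intro p hp
      rcases List.mem_append.mp hp with h2side | hloop
      · rw [hD2items] at h2side
        rcases Nat.eq_zero_or_pos (removeP 2 dN).1 with he | he
        · simp [he] at h2side
        · rw [if_neg (by omega)] at h2side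
          simp at h2side
          rw [h2side]
          intro hc
          simp at hc
          have h2y2 : (facOddP 3 (removeP 2 dN).2).2 = 2 := by exact_mod_cast hc.symm
          exact absurd hy2dvd (by rw [h2y2]; exact hy1odd)
      · obtain ⟨pe, hpe, hpeq⟩ := List.mem_map.mp hloop
        rw [← hpeq]
        intro hc
        simp at hc
        have haa : pe.1 = (facOddP 3 (removeP 2 dN).2).2 := by exact_mod_cast hc
        exact (facOddP_pairs 3 (removeP 2 dN).2 hy1pos pe hpe).2 (haa ▸ dvd_rfl)
  · rw [if_neg (by exact_mod_cast h12)]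
    show _ ++ _ = _
    rw [hD2items]
    unfold aPairs
    rw [if_neg h12]
    simp [List.append_assoc]

theorem aPairs_bound (dN : Nat) (hd : 1 ≤ dN) : ∀ pe ∈ aPairs dN, 2 ≤ pe.1 := by
  intro pe hpe
  have hy1pos : 0 < (removeP 2 dN).2 := removeP_snd_pos 2 dN (by omega)
  unfold aPairs at hpe
  rw [List.append_assoc, List.mem_append] at hpe
  rcases hpe with h2 | hpe
  · rcases Nat.eq_zero_or_pos (removeP 2 dN).1 with he | he
    · simp [he] at h2
    · rw [if_neg (by omega)] at h2
      simp at h2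
      rw [h2]
  · rw [List.mem_append] at hpe
    rcases hpe with hodd | htail
    · exact (facOddP_pairs 3 (removeP 2 dN).2 hy1pos pe hodd).1
    · by_cases h12 : 1 < (facOddP 3 (removeP 2 dN).2).2
      · rw [if_pos h12] at htail
        simp at htail
        rw [htail]
        omega
      · rw [if_neg h12] at htail
        simp at htail

-- ---------- the 2-step vs 1-step trial divisions give the same check ----------

theorem bridge (kN rN dN : Nat) (hd : 1 ≤ dN) :
    refCheck kN rN (facFromP 2 dN) =
      refCheck kN rN
        ((if (removeP 2 dN).1 = 0 then [] else [(2, (removeP 2 dN).1)]) ++ (facOddP 3 (removeP 2 dN).2).1,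
         (facOddP 3 (removeP 2 dN).2).2) := by
  have hy1odd : ¬ 2 ∣ (removeP 2 dN).2 := removeP_not_dvd 2 dN (le_refl 2) (by omega)
  have hocc : facOddP 3 (removeP 2 dN).2 = facFromP 3 (removeP 2 dN).2 :=
    facOddP_eq_facFromP 3 (removeP 2 dN).2 hy1odd (by omega) (by omega)
  by_cases h4 : 4 ≤ dN
  · rw [facFromP, dif_pos ⟨le_refl 2, by omega⟩, hocc]
    rcases Nat.eq_zero_or_pos (removeP 2 dN).1 with he | he
    · simp [he]
    · rw [if_neg (by omega), if_neg (by omega)]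
      simp
  · have hodd1 : (facOddP 3 1) = ([], 1) := by rw [facOddP, dif_neg (by omega)]
    have hodd3 : (facOddP 3 3) = ([], 3) := by rw [facOddP, dif_neg (by omega)]
    have hr21 : removeP 2 1 = (0, 1) := removeP_of_not_dvd 2 1 (by norm_num)
    have hr23 : removeP 2 3 = (0, 3) := removeP_of_not_dvd 2 3 (by norm_num)
    have hr22 : removeP 2 2 = (1, 1) := by
      rw [removeP_of_dvd 2 2 (le_refl 2) (by omega) dvd_rfl]
      norm_num [removeP_of_not_dvd 2 1 (by norm_num)]
    interval_cases dN
    · rw [facFromP, dif_neg (by omega), hr21]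
      simp [hodd1]
    · rw [facFromP, dif_neg (by omega), hr22]
      simp only [refCheck, hodd1]
      by_cases hc : carN 2 kN rN 0 = 0 <;> simp [hc] <;> omega
    · rw [facFromP, dif_neg (by omega), hr23]
      simp [hodd3]

-- ---------- region 1: d ≥ 1 and 0 ≤ k ≤ n ----------

theorem region1 (nN kN dN : Nat) (hk : kN ≤ nN) (hd : 1 ≤ dN) :
    subset_divisibility ↑nN ↑kN ↑dN = subset_divisibility_alt ↑nN ↑kN ↑dN := by
  have hsum : nN = kN + (nN - kN) := by omega
  have hy1pos : 0 < (removeP 2 dN).2 := removeP_snd_pos 2 dN (by omega)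
  have hA : subset_divisibility ↑nN ↑kN ↑dN =
      (aPairs dN).all (fun pe => decide (pe.2 ≤ carN pe.1 kN (nN - kN) 0)) := by
    unfold subset_divisibility
    rw [factorize_items dN hd]
    exact checkLoop_eq nN kN (nN - kN) hsum (aPairs dN) (aPairs_bound dN hd)
  have hB : subset_divisibility_alt ↑nN ↑kN ↑dN = refCheck kN (nN - kN) (facFromP 2 dN) := by
    unfold subset_divisibility_alt
    rw [show ((↑nN : Int) - ↑kN) = (↑(nN - kN) : Int) from by push_cast; omega,
        Int.natAbs_natCast, show (2 : Int) = ((↑(2 : Nat) : Int)) from rfl]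
    exact altOuter_eq kN (nN - kN) (dN + 2) 2 dN (le_refl 2) (by omega) (by omega) (by omega)
  rw [hA, hB, bridge kN (nN - kN) dN hd]
  unfold aPairs refCheck
  rw [List.append_assoc, List.all_append, List.all_append, List.all_append]
  by_cases h12 : 1 < (facOddP 3 (removeP 2 dN).2).2
  · rw [if_pos h12]
    by_cases hc : carN (facOddP 3 (removeP 2 dN).2).2 kN (nN - kN) 0 = 0
    · simp [h12, hc, Bool.and_assoc]
    · have h1c : 1 ≤ carN (facOddP 3 (removeP 2 dN).2).2 kN (nN - kN) 0 := by omega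
      simp [h12, hc, h1c, Bool.and_assoc]
  · rw [if_neg h12]
    simp [h12, Bool.and_assoc]

-- ---------- region 2: odd negative d (empty factor dict on both sides) ----------

theorem facDivLoop_stop (fuel : Nat) (f : Int) (fa : PySem.Dict Int Int) (x : Int)
    (hf : 0 < fuel) (h : (PySem.Int.mod x f == 0) = false) :
    facDivLoop fuel f fa x = (fa, x) := by
  cases fuel with
  | zero => omega
  | succ fuel => simp [facDivLoop, h]

theorem facOuterLoop_stop (fuel : Nat) (f : Int) (fa : PySem.Dict Int Int) (x : Int)
    (hf : 0 < fuel) (h : ¬ (f * f ≤ x)) :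
    facOuterLoop fuel f fa x = (fa, x) := by
  cases fuel with
  | zero => omega
  | succ fuel => simp [facOuterLoop, h]

theorem altOuter_tail (fuel : Nat) (k r p x : Int)
    (hf : 0 < fuel) (h : ¬ (p * p ≤ x)) (hx : ¬ (x > 1)) :
    altOuter fuel k r p x = true := by
  cases fuel with
  | zero => omega
  | succ fuel => simp [altOuter, h, hx]

theorem region2 (n k d : Int) (hd : d < 0) (hodd : d % 2 = 1) :
    subset_divisibility n k d = subset_divisibility_alt n k d := by
  have hmod : (PySem.Int.mod d 2 == 0) = false := by
    rw [PySem.Int.mod_eq_emod_of_pos (by omega : (0:Int) < 2), hodd]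
    simp
  unfold subset_divisibility subset_divisibility_alt
  simp only [factorize]
  rw [facDivLoop_stop _ _ _ _ (by omega) hmod]
  dsimp only
  rw [facOuterLoop_stop _ _ _ _ (by omega) (by omega : ¬ ((3:Int) * 3 ≤ d))]
  dsimp only
  rw [if_neg (by omega : ¬ ((1:Int) < d))]
  rw [altOuter_tail _ _ _ _ _ (by omega) (by omega : ¬ ((2:Int) * 2 ≤ d)) (by omega)]
  rfl


-- ===== VERDICT (by name: the statement is the Claim_ definition above) =====
theorem subset_divisibility_spec : Claim_equal_subset_divisibility := by
  intro n k d _ hpre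
  unfold Spec_subset_divisibility
  rcases hpre with ⟨hd, hk0, hkn⟩ | ⟨hd, hodd⟩
  · obtain ⟨kN, rfl⟩ := Int.eq_ofNat_of_zero_le hk0
    obtain ⟨nN, rfl⟩ := Int.eq_ofNat_of_zero_le (le_trans hk0 hkn)
    obtain ⟨dN, rfl⟩ := Int.eq_ofNat_of_zero_le (by omega : (0:Int) ≤ d)
    exact region1 nN kN dN (by exact_mod_cast hkn) (by exact_mod_cast hd)
  · exact region2 n k d hd hodd
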